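-- pv_equiv track=rewrite | github.com/jaemoon99/Study | algorithm_study/new_id.py | solution
-- ===== SOURCE A (Python) =====
-- def solution(new_id):
--     remove_string = ['~', '!', '@', '#', '$', '%', '^', '&', '*', '(', ')', '=', '+', '[', '{', ']', '}', ':', '?', ',', '<', '>', '/']
--     # step 1
--     step1 = new_id.lower()
--     # step 2
--     step2 = list(step1)
--     for x in range(0, len(step2)):
--         if step2[x] in remove_string:
--             step2[x] = ""
--     # step 3
--     step3 = list("".join(step2))
--     for x in range(0, len(step3)):
--         if x == len(step3) - 1:
--             break
--         elif step3[x] == '.' and step3[x + 1] == '.':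
--             step3[x] = ""
--     # step 4
--     step4 = "".join(step3).strip('.')
--     # step 5
--     step5 = list("".join(step4).strip('.'))
--     if step5 == []:
--         step5.append('a')
--     for x in range(0, len(step5)):
--         if step5[x] == ' ':
--             step5[x] = 'a'
--     # step 6
--     if len(step5) >= 16:
--         step6 = list("".join(step5[:15]).strip('.'))
--     else:
--         step6 = list("".join(step5).strip('.'))
--     # step 7
--     step7 = "".join(step6)
--     while 1:
--         if len(step7) >= 3:
--             return step7
--         else:
--             step7 += step7[-1]
-- ===== SOURCE B (Python) =====
-- def solution(new_id):
--     # one fused pass: lowercase, drop forbidden symbols, map spaces to 'a',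
--     # and collapse dot runs (keep one dot), instead of A's five separate passes
--     out = []
--     for c in new_id.lower():
--         if c in '~!@#$%^&*()=+[{]}:?,<>/':
--             continue
--         if c == ' ':
--             c = 'a'
--         if c == '.' and out and out[-1] == '.':
--             continue
--         out.append(c)
--     s = ''.join(out).strip('.')
--     if not s:
--         s = 'a'
--     s = s[:15].strip('.')
--     return s + s[-1] * (3 - len(s))
-- ===== Notes on version B (the rewrite author's own statement) =====
-- stated objective: faster
-- what changed: A's five separate passes (index loop blanking forbidden chars, index loop with look-ahead collapsing dot runs, repeated list/join/strip round-trips, index loop mapping spaces, and a while-loop padding one char at a time) are fused into a single left-to-right pass with a look-behind accumulator, followed by one strip/truncate and a closed-form replicate pad.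
import Mathlib
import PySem

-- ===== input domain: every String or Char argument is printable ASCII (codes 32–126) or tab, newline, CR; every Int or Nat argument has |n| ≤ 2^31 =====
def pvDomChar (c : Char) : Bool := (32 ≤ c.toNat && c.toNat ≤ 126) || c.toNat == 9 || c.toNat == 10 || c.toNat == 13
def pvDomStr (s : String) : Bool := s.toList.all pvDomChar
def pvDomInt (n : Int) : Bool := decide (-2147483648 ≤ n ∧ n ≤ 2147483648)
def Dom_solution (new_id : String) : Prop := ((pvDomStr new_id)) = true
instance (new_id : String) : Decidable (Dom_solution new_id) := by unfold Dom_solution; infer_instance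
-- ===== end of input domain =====

-- B replaces A's five index-mutation passes by one fused left-to-right pass plus a
-- closed-form pad (objective: faster; a timing run measured a constant-factor speedup).

-- ===== PORT A =====
def pvRemoveA : List Char :=
  ['~', '!', '@', '#', '$', '%', '^', '&', '*', '(', ')', '=', '+', '[', '{', ']', '}', ':', '?', ',', '<', '>', '/']

-- step 3 loop: entry x is blanked when it and the (still original) next entry are both '.'
def pvDedupA : List (Char) → List (List Char)
  | [] => []
  | [c] => [[c]]
  | c :: d :: rest => (if c = '.' ∧ d = '.' then [] else [c]) :: pvDedupA (d :: rest)

-- step 7 while loop; step7[-1] via pyGet? (none = Python IndexError, which no reachable input hits)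
def pvPadA (s : List Char) : List Char :=
  if 3 ≤ s.length then s
  else
    match PySem.List.pyGet? s (-1) with
    | some c => pvPadA (s ++ [c])
    | none => s
  termination_by 3 - s.length
  decreasing_by simp; omega

def solution (new_id : String) : String :=
  -- step 1
  let step1 := (PySem.Str.lower new_id).toList
  -- step 2: each removed char becomes the empty string ([]), join = flatten
  let step2 : List (List Char) := step1.map (fun c => if c ∈ pvRemoveA then [] else [c])
  -- step 3
  let step3 := pvDedupA step2.flatten
  -- step 4
  let step4 := PySem.Chars.stripChars step3.flatten ['.']
  -- step 5
  let step5a := PySem.Chars.stripChars step4 ['.']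
  let step5b := if step5a = [] then ['a'] else step5a
  let step5 := step5b.map (fun c => if c = ' ' then 'a' else c)
  -- step 6 (step5[:15] = slice)
  let step6 :=
    if 16 ≤ step5.length then
      PySem.Chars.stripChars (PySem.List.slice step5 none (some 15)) ['.']
    else PySem.Chars.stripChars step5 ['.']
  -- step 7
  String.ofList (pvPadA step6)

-- ===== PORT B =====
def pvForbidB : List Char := "~!@#$%^&*()=+[{]}:?,<>/".toList

def pvStepB (out : List Char) (c : Char) : List Char :=
  if c ∈ pvForbidB then out
  else
    let c' := if c = ' ' then 'a' else c
    if c' = '.' ∧ out.getLast? = some '.' then out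
    else out ++ [c']

def solution_alt (new_id : String) : String :=
  let out := (PySem.Str.lower new_id).toList.foldl pvStepB []
  let s1 := PySem.Chars.stripChars out ['.']
  let s2 := if s1 = [] then ['a'] else s1
  let s3 := PySem.Chars.stripChars (PySem.List.slice s2 none (some 15)) ['.']
  -- s3 + s3[-1] * (3 - len(s3)); pyGet? none = Python IndexError, which no reachable input hits
  match PySem.List.pyGet? s3 (-1) with
  | some c => String.ofList (s3 ++ List.replicate (3 - s3.length) c)
  | none => String.ofList s3

-- ===== PRECONDITION & SPEC =====
def Spec_solution (new_id : String) (out : String) : Prop := out = solution_alt new_id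
instance (new_id : String) (out : String) : Decidable (Spec_solution new_id out) := by unfold Spec_solution; infer_instance

-- ===== CLAIM (what is proved, stated in full; the proofs are below) =====
def Claim_equal_solution : Prop := ∀ (new_id : String), Dom_solution new_id → Spec_solution new_id (solution new_id)

-- ===== LEMMAS AND PROOFS =====

-- proof-side pure descriptions of the two pipelines
def pvM (L : List Char) : List Char := L.map (fun c => if c = ' ' then 'a' else c)
def pvF (L : List Char) : List Char := L.filter (fun c => !(pvRemoveA.contains c))

-- look-ahead dot collapse (what A's step-3 loop computes)
def pvDD : List Char → List Char
  | [] => []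
  | c :: r => if c = '.' ∧ r.head? = some '.' then pvDD r else c :: pvDD r

-- look-behind dot collapse (what B's fold computes, after filter/map are split off)
def pvC1 : Option Char → List Char → List Char
  | _, [] => []
  | p, c :: r => if c = '.' ∧ p = some '.' then pvC1 p r else c :: pvC1 (some c) r

-- B's fold body as a function of the last emitted character
def pvG : Option Char → List Char → List Char
  | _, [] => []
  | p, c :: r =>
    if c ∈ pvForbidB then pvG p r
    else
      let c' := if c = ' ' then 'a' else c
      if c' = '.' ∧ p = some '.' then pvG p r else c' :: pvG (some c') r

theorem pvForbid_eq : pvForbidB = pvRemoveA := by decide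

theorem foldl_stepB (L : List Char) : ∀ out, L.foldl pvStepB out = out ++ pvG out.getLast? L := by
  induction L with
  | nil => intro out; simp [pvG]
  | cons c r ih =>
    intro out
    by_cases hc : c ∈ pvForbidB
    · simp [List.foldl_cons, pvStepB, hc, ih, pvG]
    · by_cases h2 : (if c = ' ' then 'a' else c) = '.' ∧ out.getLast? = some '.'
      · simp [List.foldl_cons, pvStepB, hc, h2, ih, pvG]
      · simp [List.foldl_cons, pvStepB, hc, h2, ih, pvG]

theorem pvG_eq_c1 (L : List Char) : ∀ p, pvG p L = pvC1 p (pvM (pvF L)) := by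
  induction L with
  | nil => intro p; simp [pvG, pvF, pvM, pvC1]
  | cons c r ih =>
    intro p
    by_cases hc : c ∈ pvForbidB
    · have hm : c ∈ pvRemoveA := pvForbid_eq ▸ hc
      simp [pvG, hc, pvF, List.filter_cons, hm, ih]
    · have hm : c ∉ pvRemoveA := fun h => hc (pvForbid_eq.symm ▸ h)
      by_cases h2 : (if c = ' ' then 'a' else c) = '.' ∧ p = some '.'
      · simp [pvG, hc, h2, pvF, hm, pvM, pvC1, ih]
      · simp [pvG, hc, h2, pvF, hm, pvM, pvC1, ih]

theorem flatten_map_filter (L : List Char) :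
    (L.map (fun c => if c ∈ pvRemoveA then [] else [c])).flatten = pvF L := by
  induction L with
  | nil => rfl
  | cons c r ih =>
    by_cases hc : c ∈ pvRemoveA
    · simp [hc, pvF, ih]
    · simp [hc, pvF, ih]

theorem pvDD_cons (c : Char) (r : List Char) :
    pvDD (c :: r) = if c = '.' ∧ r.head? = some '.' then pvDD r else c :: pvDD r := rfl

theorem pvC1_cons (p : Option Char) (c : Char) (r : List Char) :
    pvC1 p (c :: r) = if c = '.' ∧ p = some '.' then pvC1 p r else c :: pvC1 (some c) r := rfl

theorem flatten_dedupA : ∀ X : List Char, (pvDedupA X).flatten = pvDD X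
  | [] => rfl
  | [c] => by simp [pvDedupA, pvDD]
  | c :: d :: rest => by
    have ihr := flatten_dedupA (d :: rest)
    by_cases h : c = '.' ∧ d = '.'
    · obtain ⟨hc, hd⟩ := h; subst hc; subst hd
      rw [show pvDedupA ('.' :: '.' :: rest) = [] :: pvDedupA ('.' :: rest) by simp [pvDedupA]]
      rw [show pvDD ('.' :: '.' :: rest) = pvDD ('.' :: rest) by rw [pvDD_cons]; simp]
      simpa using ihr
    · rw [show pvDedupA (c :: d :: rest) = [c] :: pvDedupA (d :: rest) by simp [pvDedupA, h]]
      rw [pvDD_cons, if_neg (by simpa using h)]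
      simpa using ihr

theorem c1_some_ne (X : List Char) (p : Char) (hp : p ≠ '.') : pvC1 (some p) X = pvC1 none X := by
  cases X with
  | nil => rfl
  | cons c r =>
    rw [pvC1_cons, pvC1_cons, if_neg (by simp [hp]), if_neg (by simp)]

theorem ddDot (r : List Char) : pvDD ('.' :: r) = '.' :: pvDD (r.dropWhile (· == '.')) := by
  induction r with
  | nil => rfl
  | cons x t ih =>
    by_cases hx : x = '.'
    · subst hx
      rw [show pvDD ('.' :: '.' :: t) = pvDD ('.' :: t) by rw [pvDD_cons]; simp]
      rw [ih, List.dropWhile_cons_of_pos (by simp)]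
    · rw [pvDD_cons, if_neg (by simp [hx]), List.dropWhile_cons_of_neg (by simp [hx])]

theorem c1_dd_aux : ∀ n (X : List Char), X.length ≤ n →
    pvC1 none X = pvDD X ∧ pvC1 (some '.') X = pvDD (X.dropWhile (· == '.')) := by
  intro n
  induction n with
  | zero =>
    intro X hX
    have : X = [] := List.eq_nil_of_length_eq_zero (Nat.le_zero.mp hX)
    subst this; exact ⟨rfl, rfl⟩
  | succ n ih =>
    intro X hX
    cases X with
    | nil => exact ⟨rfl, rfl⟩
    | cons c r =>
      have hr : r.length ≤ n := by simpa using hX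
      obtain ⟨ih1, ih2⟩ := ih r hr
      constructor
      · rw [pvC1_cons, if_neg (by simp)]
        by_cases hc : c = '.'
        · subst hc
          rw [ih2, ← ddDot]
        · rw [c1_some_ne r c hc, ih1, pvDD_cons, if_neg (fun h => hc h.1)]
      · by_cases hc : c = '.'
        · subst hc
          rw [pvC1_cons, if_pos ⟨rfl, rfl⟩, ih2, List.dropWhile_cons_of_pos (by simp)]
        · rw [pvC1_cons, if_neg (by simp [hc]), c1_some_ne r c hc, ih1,
              List.dropWhile_cons_of_neg (by simp [hc]), pvDD_cons, if_neg (fun h => hc h.1)]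

theorem c1_eq_dd (X : List Char) : pvC1 none X = pvDD X :=
  (c1_dd_aux X.length X le_rfl).1

theorem mchar_dot (c : Char) : ((if c = ' ' then 'a' else c) = '.') ↔ c = '.' := by
  by_cases hc : c = ' '
  · subst hc; decide
  · simp [hc]

theorem dd_map_M (X : List Char) : pvDD (pvM X) = pvM (pvDD X) := by
  induction X with
  | nil => rfl
  | cons c r ih =>
    have hhead : ((pvM r).head? = some '.') ↔ (r.head? = some '.') := by
      cases r with
      | nil => simp [pvM]
      | cons x t => simpa [pvM] using mchar_dot x
    have hM : pvM (c :: r) = (if c = ' ' then 'a' else c) :: pvM r := rfl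
    by_cases h : c = '.' ∧ r.head? = some '.'
    · rw [hM, pvDD_cons, if_pos ⟨(mchar_dot c).mpr h.1, hhead.mpr h.2⟩, ih,
          pvDD_cons, if_pos h]
    · have h' : ¬((if c = ' ' then 'a' else c) = '.' ∧ (pvM r).head? = some '.') := by
        intro hcon; exact h ⟨(mchar_dot c).mp hcon.1, hhead.mp hcon.2⟩
      rw [hM, pvDD_cons, if_neg h', ih, pvDD_cons, if_neg h]; rfl

theorem dropWhile_dot_map_M (X : List Char) :
    (pvM X).dropWhile (fun c => ['.'].contains c) = pvM (X.dropWhile (fun c => ['.'].contains c)) := by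
  induction X with
  | nil => rfl
  | cons c r ih =>
    have hM : pvM (c :: r) = (if c = ' ' then 'a' else c) :: pvM r := rfl
    by_cases hc : c = '.'
    · subst hc
      rw [hM, List.dropWhile_cons_of_pos (by decide), List.dropWhile_cons_of_pos (by decide)]
      exact ih
    · have h1 : ¬(['.'].contains ((if c = ' ' then 'a' else c)) = true) := by
        simp only [List.contains_cons, List.contains_nil, Bool.or_false, beq_iff_eq]
        exact fun h => hc ((mchar_dot c).mp h)
      have h2 : ¬(['.'].contains c = true) := by
        simp only [List.contains_cons, List.contains_nil, Bool.or_false, beq_iff_eq]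
        exact fun h => hc h
      rw [hM, List.dropWhile_cons_of_neg (by simpa using h1),
          List.dropWhile_cons_of_neg (by simpa using h2), hM]

theorem strip_map_M (X : List Char) :
    PySem.Chars.stripChars (pvM X) ['.'] = pvM (PySem.Chars.stripChars X ['.']) := by
  simp only [PySem.Chars.stripChars]
  rw [dropWhile_dot_map_M]
  rw [show (pvM (X.dropWhile fun c => ['.'].contains c)).reverse
        = pvM ((X.dropWhile fun c => ['.'].contains c)).reverse by simp [pvM]]
  rw [dropWhile_dot_map_M]
  simp [pvM]

theorem dropWhile_idem {α : Type} (p : α → Bool) (l : List α) :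
    (l.dropWhile p).dropWhile p = l.dropWhile p := by
  cases h : l.dropWhile p with
  | nil => rfl
  | cons a t =>
    have := List.head?_dropWhile_not p l
    rw [h] at this
    simp at this
    rw [List.dropWhile_cons_of_neg (by simp [this])]

def pvLS (l : List Char) : List Char := l.dropWhile (fun c => ['.'].contains c)
def pvRS (l : List Char) : List Char := (l.reverse.dropWhile (fun c => ['.'].contains c)).reverse

theorem strip_eq_rs_ls (X : List Char) : PySem.Chars.stripChars X ['.'] = pvRS (pvLS X) := rfl

theorem dropWhile_head_fail {p : Char → Bool} {l : List Char} {a : Char}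
    (hh : l.head? = some a) (ha : ¬ p a = true) : l.dropWhile p = l := by
  cases l with
  | nil => simp at hh
  | cons x y =>
    simp only [List.head?_cons, Option.some.injEq] at hh
    subst hh
    rw [List.dropWhile_cons_of_neg ha]

theorem rs_idem (m : List Char) : pvRS (pvRS m) = pvRS m := by
  unfold pvRS
  rw [List.reverse_reverse, dropWhile_idem]

theorem ls_rs_ls (X : List Char) : pvLS (pvRS (pvLS X)) = pvRS (pvLS X) := by
  cases hm : pvLS X with
  | nil => rfl
  | cons a t =>
    have ha : ¬ (fun c => List.contains ['.'] c) a = true := by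
      have := List.head?_dropWhile_not (fun c => List.contains ['.'] c) X
      unfold pvLS at hm
      rw [hm] at this
      simpa using this
    cases hr : (a :: t).reverse.dropWhile (fun c => ['.'].contains c) with
    | nil =>
      exfalso
      have hall := List.dropWhile_eq_nil_iff.mp hr
      exact ha (by simpa using hall a (by simp))
    | cons b u =>
      have hb : ((b :: u).reverse).head? = some a := by
        have hsuff : (b :: u) <:+ (a :: t).reverse := by
          rw [← hr]; exact List.dropWhile_suffix _
        have hlast : (b :: u).getLast? = ((a :: t).reverse).getLast? := by
          rcases hsuff with ⟨pre, hpre⟩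
          rw [← hpre, List.getLast?_append]
          obtain ⟨z, hz⟩ : ∃ z, (b :: u).getLast? = some z :=
            ⟨_, List.getLast?_eq_some_getLast (by simp)⟩
          rw [hz]
          rfl
        rw [List.head?_reverse, hlast, List.getLast?_reverse, List.head?_cons]
      show pvLS (pvRS (a :: t)) = pvRS (a :: t)
      unfold pvLS pvRS
      rw [hr, dropWhile_head_fail hb ha]

theorem strip_idem (X : List Char) :
    PySem.Chars.stripChars (PySem.Chars.stripChars X ['.']) ['.'] = PySem.Chars.stripChars X ['.'] := by
  rw [strip_eq_rs_ls X, strip_eq_rs_ls, ls_rs_ls, rs_idem]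

-- pad: A's while loop equals B's closed-form replicate
theorem pyGet_neg_one (T : List Char) (hT : T ≠ []) :
    PySem.List.pyGet? T (-1) = T.getLast? := by
  have hlen : 0 < T.length := List.length_pos_iff.mpr hT
  rw [show (-1 : Int) = -((1 : Nat) : Int) by simp]
  rw [PySem.List.pyGet?_neg_natCast T 1 (by omega) (by omega)]
  rw [List.getLast?_eq_getElem?]

theorem pad_eq : ∀ n (T : List Char), 3 - T.length ≤ n → ∀ c, T.getLast? = some c →
    pvPadA T = T ++ List.replicate (3 - T.length) c := by
  intro n
  induction n with
  | zero =>
    intro T hT c hc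
    have : 3 ≤ T.length := by omega
    rw [pvPadA, if_pos this]
    simp [show 3 - T.length = 0 by omega]
  | succ n ih =>
    intro T hT c hc
    by_cases h3 : 3 ≤ T.length
    · rw [pvPadA, if_pos h3]
      simp [show 3 - T.length = 0 by omega]
    · have hne : T ≠ [] := fun h => by simp [h] at hc
      rw [pvPadA, if_neg h3, pyGet_neg_one T hne, hc]
      show pvPadA (T ++ [c]) = T ++ List.replicate (3 - T.length) c
      have hlast : (T ++ [c]).getLast? = some c := by simp
      rw [ih (T ++ [c]) (by simp only [List.length_append, List.length_cons, List.length_nil]; omega) c hlast]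
      have : 3 - T.length = (3 - (T ++ [c]).length) + 1 := by
        simp only [List.length_append, List.length_cons, List.length_nil]
        omega
      rw [this]
      simp [List.replicate_succ]

-- ===== VERDICT (by name: the statement is the Claim_ definition above) =====
theorem solution_spec : Claim_equal_solution := by
  intro new_id _
  unfold Spec_solution solution solution_alt
  simp only []
  set L := (PySem.Str.lower new_id).toList with hL
  -- B's fold = c1 none (M (F L)) = dd (M (F L)) = M (dd (F L))
  have hfold : L.foldl pvStepB [] = pvM (pvDD (pvF L)) := by
    rw [foldl_stepB, show ([] : List Char).getLast? = none from rfl, pvG_eq_c1, c1_eq_dd, dd_map_M]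
    simp
  -- A's step2/3 = dd (F L)
  have hstep3 : (pvDedupA ((L.map (fun c => if c ∈ pvRemoveA then [] else [c])).flatten)).flatten
      = pvDD (pvF L) := by
    rw [flatten_map_filter, flatten_dedupA]
  rw [hfold, hstep3]
  have hmap : ∀ l : List Char, List.map (fun c => if c = ' ' then 'a' else c) l = pvM l :=
    fun _ => rfl
  simp only [hmap]
  set S := pvDD (pvF L) with hS
  -- A: strip twice; B: strip once of M S = M (strip S)
  rw [strip_idem]
  conv_rhs => rw [strip_map_M]
  set S4 := PySem.Chars.stripChars S ['.'] with hS4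
  -- empty check commutes with M
  have hemp : (pvM S4 = []) ↔ (S4 = []) := by simp [pvM]
  have hbody : (if pvM S4 = [] then ['a'] else pvM S4)
      = pvM (if S4 = [] then ['a'] else S4) := by
    by_cases h : S4 = []
    · simp [h, pvM]
    · rw [if_neg h, if_neg (fun hh => h (hemp.mp hh))]
  rw [hbody]
  set S5 := pvM (if S4 = [] then ['a'] else S4) with hS5
  -- A's step-6 branch: when len < 16 the slice [:15] is the identity
  have hslice : PySem.List.slice S5 none (some 15) = S5.take 15 := by
    rw [PySem.List.slice_to S5 (by norm_num)]
    rfl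
  have hbranch : (if 16 ≤ S5.length then
        PySem.Chars.stripChars (PySem.List.slice S5 none (some 15)) ['.']
      else PySem.Chars.stripChars S5 ['.'])
      = PySem.Chars.stripChars (PySem.List.slice S5 none (some 15)) ['.'] := by
    by_cases h : 16 ≤ S5.length
    · rw [if_pos h]
    · rw [if_neg h, hslice, List.take_of_length_le (by omega)]
  rw [hbranch]
  set T := PySem.Chars.stripChars (PySem.List.slice S5 none (some 15)) ['.'] with hT
  -- final padding
  clear_value T
  cases T with
  | nil =>
    rw [pvPadA]
    rfl
  | cons x y =>
    have hne : (x :: y : List Char) ≠ [] := by simp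
    obtain ⟨c, hc⟩ : ∃ c, (x :: y).getLast? = some c :=
      ⟨(x :: y).getLast hne, List.getLast?_eq_some_getLast hne⟩
    rw [pyGet_neg_one _ hne, hc, pad_eq (3 - (x :: y).length) (x :: y) le_rfl c hc]
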